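-- pv_equiv track=rewrite | github.com/Dash198/truth-table-solver | kmap_solver.py | postfix_to_verilog
-- ===== SOURCE A (Python) =====
-- def postfix_to_verilog(postfix_stack, vars=['A','B']):
--     stack = []
--     for token in postfix_stack:
--         if token.isalnum():
--             stack.append(token)
--         else:
--             if(token=="~"):
--                 stack.append(token+stack.pop())
--             else:
--                 b = stack.pop()
--                 stack.append("(" + stack.pop() + " " + token + " " + b + ")")
--
--     inputs = ", ".join(f"input {x}" for x in vars)
--     y = stack.pop()
--     out = f"""module f({inputs}, output Y);
--     assign Y = {y};
-- endmodule"""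
--     return out
-- ===== SOURCE B (Python) =====
-- def postfix_to_verilog(postfix_stack, variables=['A','B']):
--     # Recursive-descent parse of the postfix list consumed from the end
--     # (the reversed postfix is a prefix expression).
--     it = reversed(postfix_stack)
--
--     def build():
--         token = next(it)
--         if token.isalnum():
--             return token
--         if token == "~":
--             return "~" + build()
--         right = build()
--         left = build()
--         return "(" + left + " " + token + " " + right + ")"
--
--     y = build()
--     inputs = ", ".join(f"input {x}" for x in variables)
--     return f"""module f({inputs}, output Y);
--     assign Y = {y};
-- endmodule"""
-- ===== Notes on version B (the rewrite author's own statement) =====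
-- stated objective: alternative
-- what changed: Replaces the left-to-right explicit-stack evaluation with a recursive-descent parse that consumes the postfix tokens from the end (reversed postfix = prefix), building only the final expression directly.
import Mathlib
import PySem

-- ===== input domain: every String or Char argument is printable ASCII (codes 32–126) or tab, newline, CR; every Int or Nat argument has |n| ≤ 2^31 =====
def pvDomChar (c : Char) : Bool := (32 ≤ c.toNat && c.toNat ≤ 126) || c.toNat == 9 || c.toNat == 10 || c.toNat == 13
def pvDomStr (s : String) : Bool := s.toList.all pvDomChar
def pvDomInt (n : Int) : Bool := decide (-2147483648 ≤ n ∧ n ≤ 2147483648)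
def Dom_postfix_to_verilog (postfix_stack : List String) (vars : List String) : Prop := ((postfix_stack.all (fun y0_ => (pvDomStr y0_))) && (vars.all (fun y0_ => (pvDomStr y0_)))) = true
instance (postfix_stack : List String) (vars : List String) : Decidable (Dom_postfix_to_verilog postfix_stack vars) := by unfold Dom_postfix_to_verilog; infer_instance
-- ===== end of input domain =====

-- B replaces A's left-to-right explicit-stack evaluation by a recursive-descent
-- parse consuming the postfix tokens from the end (objective: alternative).

-- ===== PORT A =====
-- one loop step of A: Python's stack top is the Lean list head; none = IndexError
def pvStepA (st : Option (List String)) (token : String) : Option (List String) :=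
  match st with
  | none => none
  | some stack =>
    if PySem.Str.strIsalnum token then some (token :: stack)
    else if token == "~" then
      match stack with
      | e :: rest => some ((token ++ e) :: rest)
      | [] => none
    else
      match stack with
      | b :: a :: rest => some (("(" ++ a ++ " " ++ token ++ " " ++ b ++ ")") :: rest)
      | _ => none

def postfix_to_verilog (postfix_stack : List String) (vars : List String) : String :=
  let stack := postfix_stack.foldl pvStepA (some [])
  let inputs := PySem.Str.join ", " (vars.map (fun x => "input " ++ x))
  match stack with
  | some (y :: _) => "module f(" ++ inputs ++ ", output Y);\n    assign Y = " ++ y ++ ";\nendmodule"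
  | _ => ""   -- Python raises IndexError here; excluded by Pre_

-- ===== PORT B =====
-- Source B's build(): pops the next token from the reversed list; fuel only makes
-- the recursion structural (it never runs out on inputs where build returns);
-- none = the IndexError/StopIteration of Source B, excluded by Pre_
def pvBuild : Nat → List String → Option (String × List String)
  | 0, _ => none
  | _ + 1, [] => none
  | fuel + 1, token :: rest =>
    if PySem.Str.strIsalnum token then some (token, rest)
    else if token == "~" then
      match pvBuild fuel rest with
      | some (e, r) => some ("~" ++ e, r)
      | none => none
    else
      match pvBuild fuel rest with
      | some (right, r) =>
        match pvBuild fuel r with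
        | some (left, r2) => some ("(" ++ left ++ " " ++ token ++ " " ++ right ++ ")", r2)
        | none => none
      | none => none

def postfix_to_verilog_alt (postfix_stack : List String) (vars : List String) : String :=
  let rts := postfix_stack.reverse
  let y := match pvBuild rts.length rts with
    | some (e, _) => e
    | none => ""   -- Source B raises here; excluded by Pre_
  let inputs := PySem.Str.join ", " (vars.map (fun x => "input " ++ x))
  "module f(" ++ inputs ++ ", output Y);\n    assign Y = " ++ y ++ ";\nendmodule"

-- ===== PRECONDITION & SPEC =====
-- how many operands a token pops (before pushing)
def pvNeed (t : String) : Int := if PySem.Str.strIsalnum t then 0 else if t == "~" then 1 else 2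
-- net stack effect of a token
def pvEff (t : String) : Int := if PySem.Str.strIsalnum t then 1 else if t == "~" then 0 else -1
def pvSumEff (ts : List String) : Int := (ts.map pvEff).sum

-- Pre_ = exactly the inputs on which Python A returns (no stack underflow at any
-- token, and a nonempty stack for the final pop); closed-form counting condition.
def Pre_postfix_to_verilog (postfix_stack : List String) (vars : List String) : Prop :=
  (∀ i, i < postfix_stack.length → pvNeed (postfix_stack[i]!) ≤ pvSumEff (postfix_stack.take i)) ∧
  1 ≤ pvSumEff postfix_stack

instance (postfix_stack : List String) (vars : List String) : Decidable (Pre_postfix_to_verilog postfix_stack vars) := by unfold Pre_postfix_to_verilog; infer_instance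

def pvWitness_postfix_to_verilog : List String × List String := (["A", "B", "&", "~"], ["A", "B"])

def Spec_postfix_to_verilog (postfix_stack : List String) (vars : List String) (out : String) : Prop := out = postfix_to_verilog_alt postfix_stack vars
instance (postfix_stack : List String) (vars : List String) (out : String) : Decidable (Spec_postfix_to_verilog postfix_stack vars out) := by unfold Spec_postfix_to_verilog; infer_instance

-- ===== CLAIM (what is proved, stated in full; the proofs are below) =====
def Claim_equal_postfix_to_verilog : Prop := ∀ (postfix_stack : List String) (vars : List String), Dom_postfix_to_verilog postfix_stack vars → Pre_postfix_to_verilog postfix_stack vars → Spec_postfix_to_verilog postfix_stack vars (postfix_to_verilog postfix_stack vars)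

-- ===== LEMMAS AND PROOFS =====

-- pvBuild consumes at least one token
theorem pvBuild_len : ∀ (f : Nat) (rts : List String) (e : String) (r : List String),
    pvBuild f rts = some (e, r) → r.length < rts.length := by
  intro f
  induction f with
  | zero => intro rts e r h; simp [pvBuild] at h
  | succ f ih =>
    intro rts e r h
    cases rts with
    | nil => simp [pvBuild] at h
    | cons t rest =>
      simp only [pvBuild] at h
      split at h
      · cases h; simp
      · split at h
        · cases hb : pvBuild f rest with
          | none => rw [hb] at h; cases h
          | some p =>
            obtain ⟨e1, r1⟩ := p
            rw [hb] at h
            simp only [] at h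
            cases h
            have h1 := ih rest e1 _ hb
            simp; omega
        · cases hb : pvBuild f rest with
          | none => rw [hb] at h; cases h
          | some p =>
            obtain ⟨e1, r1⟩ := p
            rw [hb] at h
            simp only [] at h
            cases hc : pvBuild f r1 with
            | none => rw [hc] at h; cases h
            | some q =>
              obtain ⟨e2, r2⟩ := q
              rw [hc] at h
              simp only [] at h
              cases h
              have h1 := ih rest e1 r1 hb
              have h2 := ih r1 e2 _ hc
              simp; omega

-- any sufficient fuel gives the same result
theorem pvBuild_irrel : ∀ (f g : Nat) (rts : List String),
    rts.length ≤ f → rts.length ≤ g → pvBuild f rts = pvBuild g rts := by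
  intro f
  induction f with
  | zero =>
    intro g rts hf _
    have : rts = [] := by cases rts <;> simp_all
    subst this
    cases g <;> simp [pvBuild]
  | succ f ih =>
    intro g rts hf hg
    cases rts with
    | nil => cases g <;> simp [pvBuild]
    | cons t rest =>
      cases g with
      | zero => simp at hg
      | succ g =>
        simp only [List.length_cons] at hf hg
        have hrest : pvBuild f rest = pvBuild g rest := ih g rest (by omega) (by omega)
        simp only [pvBuild, hrest]
        split
        · rfl
        · split
          · rfl
          · cases hb : pvBuild g rest with
            | none => rfl
            | some p =>
              obtain ⟨e1, r1⟩ := p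
              have hl : r1.length < rest.length := pvBuild_len g rest e1 r1 hb
              simp only []
              rw [ih g r1 (by omega) (by omega)]

def pvBN (rts : List String) : Option (String × List String) := pvBuild rts.length rts

theorem pvBN_nil : pvBN [] = none := rfl

theorem pvBN_cons (t : String) (rts : List String) :
    pvBN (t :: rts) =
      if PySem.Str.strIsalnum t then some (t, rts)
      else if t == "~" then
        match pvBN rts with
        | some (e, r) => some ("~" ++ e, r)
        | none => none
      else
        match pvBN rts with
        | some (right, r) =>
          match pvBN r with
          | some (left, r2) => some ("(" ++ left ++ " " ++ t ++ " " ++ right ++ ")", r2)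
          | none => none
        | none => none := by
  show pvBuild (rts.length + 1) (t :: rts) = _
  simp only [pvBuild]
  split
  · rfl
  · split
    · rfl
    · cases hb : pvBuild rts.length rts with
      | none => simp [pvBN, hb]
      | some p =>
        obtain ⟨e1, r1⟩ := p
        have hl : r1.length < rts.length := pvBuild_len rts.length rts e1 r1 hb
        simp only [pvBN, hb]
        rw [pvBuild_irrel rts.length r1.length r1 (by omega) (le_refl _)]

-- the whole stack A maintains, reconstructed from the reversed token list
def pvSN : List String → Option (List String)
  | [] => some []
  | t :: rts =>
    match h : pvBN (t :: rts) with
    | none => none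
    | some (e, r) => (pvSN r).map (e :: ·)
  termination_by l => l.length
  decreasing_by
    exact pvBuild_len _ _ _ _ h

theorem pvSN_nil : pvSN [] = some [] := by rw [pvSN]

theorem pvSN_cons (t : String) (rts : List String) :
    pvSN (t :: rts) =
      match pvBN (t :: rts) with
      | none => none
      | some (e, r) => (pvSN r).map (e :: ·) := by
  rw [pvSN]
  cases hb : pvBN (t :: rts) <;> simp

-- one loop step of A = one more token on the reversed list
theorem pvStep_SN (t : String) (rts : List String) :
    pvStepA (pvSN rts) t = pvSN (t :: rts) := by
  rw [pvSN_cons, pvBN_cons]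
  by_cases ha : PySem.Str.strIsalnum t = true
  · have ha' : PySem.Chars.strIsalnum t.toList = true := by simpa using ha
    simp only [ha, if_true]
    cases hs : pvSN rts with
    | none => simp [pvStepA, hs]
    | some stack => simp [pvStepA, hs, ha']
  · have ha' : PySem.Chars.strIsalnum t.toList = false := by
      simpa using ha
    simp only [ha, if_false]
    by_cases hn : t == "~"
    · have ht : t = "~" := by simpa using hn
      subst ht
      have ha2 : PySem.Chars.strIsalnum ['~'] = false := by decide
      simp only [hn, if_true]
      cases hb : pvBN rts with
      | none =>
        cases rts with
        | nil => simp [pvSN_nil, pvStepA, ha2]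
        | cons x xs =>
          rw [pvSN_cons, hb]
          simp [pvStepA]
      | some p =>
        obtain ⟨e, r⟩ := p
        cases rts with
        | nil => rw [pvBN_nil] at hb; cases hb
        | cons x xs =>
          rw [pvSN_cons, hb]
          simp only []
          cases hc : pvSN r with
          | none => simp [pvStepA, hc]
          | some es => simp [pvStepA, hc, ha2]
    · have hn' : ¬(t = "~") := by simpa using hn
      simp only [hn, if_false]
      cases hb : pvBN rts with
      | none =>
        cases rts with
        | nil => simp [pvSN_nil, pvStepA, ha', hn']
        | cons x xs =>
          rw [pvSN_cons, hb]
          simp [pvStepA]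
      | some p =>
        obtain ⟨b, r⟩ := p
        cases rts with
        | nil => rw [pvBN_nil] at hb; cases hb
        | cons x xs =>
          rw [pvSN_cons, hb]
          simp only []
          cases hc : pvBN r with
          | none =>
            cases r with
            | nil => simp [pvSN_nil, pvBN_nil, pvStepA, ha', hn']
            | cons z zs =>
              rw [pvSN_cons, hc]
              simp [pvStepA, hc]
          | some q =>
            obtain ⟨a2, r2⟩ := q
            cases r with
            | nil => rw [pvBN_nil] at hc; cases hc
            | cons z zs =>
              rw [pvSN_cons, hc]
              simp only []
              cases hd : pvSN r2 with
              | none => simp [pvStepA, hd]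
              | some es => simp [pvStepA, hd, ha', hn']

-- A's fold over the tokens = the reconstruction from the reversed list
theorem pvFold_SN (ts : List String) :
    ts.foldl pvStepA (some []) = pvSN ts.reverse := by
  induction ts using List.reverseRecOn with
  | nil => simp [pvSN_nil]
  | append_singleton ts t ih =>
    rw [List.foldl_append, List.reverse_append]
    simp only [List.foldl_cons, List.foldl_nil, List.reverse_singleton, List.singleton_append]
    rw [ih, pvStep_SN]

-- under Pre_'s counting condition A's fold succeeds, with stack length = net effect
theorem pvFold_succeeds (ts : List String)
    (h : ∀ i, i < ts.length → pvNeed (ts[i]!) ≤ pvSumEff (ts.take i)) :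
    ∃ s : List String, ts.foldl pvStepA (some []) = some s ∧ (s.length : Int) = pvSumEff ts := by
  induction ts using List.reverseRecOn with
  | nil => exact ⟨[], rfl, by simp [pvSumEff]⟩
  | append_singleton ts t ih =>
    have hih : ∀ i, i < ts.length → pvNeed (ts[i]!) ≤ pvSumEff (ts.take i) := by
      intro i hi
      have h1 := h i (by simp; omega)
      rwa [getElem!_pos (ts ++ [t]) i (by simp; omega), List.getElem_append_left hi,
           List.take_append_of_le_length (by omega), ← getElem!_pos ts i hi] at h1
    obtain ⟨s, hs, hlen⟩ := ih hih
    have hneed : pvNeed t ≤ (s.length : Int) := by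
      have h2 := h ts.length (by simp)
      rwa [getElem!_pos (ts ++ [t]) ts.length (by simp), List.getElem_concat_length,
           List.take_left, ← hlen] at h2
      rfl
    have hsum : pvSumEff (ts ++ [t]) = pvSumEff ts + pvEff t := by
      simp [pvSumEff]
    rw [List.foldl_append, hs]
    simp only [List.foldl_cons, List.foldl_nil]
    by_cases ha : PySem.Str.strIsalnum t = true
    · have ha' : PySem.Chars.strIsalnum t.toList = true := by simpa using ha
      refine ⟨t :: s, by simp [pvStepA, ha'], ?_⟩
      rw [hsum]; simp [pvEff, ha', hlen]
    · have ha' : PySem.Chars.strIsalnum t.toList = false := by simpa using ha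
      by_cases hn : t == "~"
      · have ht : t = "~" := by simpa using hn
        have h1 : (1 : Int) ≤ s.length := by
          have : pvNeed t = 1 := by simp [pvNeed, ha', hn]
          omega
        cases s with
        | nil => simp at h1
        | cons e rest =>
          refine ⟨(t ++ e) :: rest, by subst ht; simp [pvStepA, show PySem.Chars.strIsalnum ['~'] = false by decide], ?_⟩
          rw [hsum]
          simp only [pvEff, ha, if_false, hn, if_true]
          simp at hlen ⊢; omega
      · have hn' : ¬(t = "~") := by simpa using hn
        have h2 : (2 : Int) ≤ s.length := by
          have : pvNeed t = 2 := by simp [pvNeed, ha', hn]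
          omega
        cases s with
        | nil => simp at h2
        | cons b rest1 =>
          cases rest1 with
          | nil => simp at h2
          | cons a rest =>
            refine ⟨("(" ++ a ++ " " ++ t ++ " " ++ b ++ ")") :: rest, by simp [pvStepA, ha', hn'], ?_⟩
            rw [hsum]
            simp only [pvEff, ha, if_false, hn]
            simp at hlen ⊢; omega

-- ===== VERDICT (by name: the statement is the Claim_ definition above) =====
theorem postfix_to_verilog_spec : Claim_equal_postfix_to_verilog := by
  intro ps vars _ hpre
  obtain ⟨hneed, hsum⟩ := hpre
  obtain ⟨s, hs, hlen⟩ := pvFold_succeeds ps hneed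
  cases s with
  | nil => simp at hlen; omega
  | cons y rest =>
    have hsn : pvSN ps.reverse = some (y :: rest) := by rw [← pvFold_SN, hs]
    have hbn : ∃ r, pvBN ps.reverse = some (y, r) := by
      cases hr : ps.reverse with
      | nil => rw [hr, pvSN_nil] at hsn; cases hsn
      | cons x xs =>
        rw [hr, pvSN_cons] at hsn
        cases hb : pvBN (x :: xs) with
        | none => rw [hb] at hsn; cases hsn
        | some p =>
          obtain ⟨e, r⟩ := p
          rw [hb] at hsn
          simp only [] at hsn
          cases hc : pvSN r with
          | none => rw [hc] at hsn; cases hsn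
          | some es =>
            rw [hc] at hsn
            simp at hsn
            exact ⟨r, by rw [hsn.1]⟩
    obtain ⟨r, hbn⟩ := hbn
    show _ = postfix_to_verilog_alt ps vars
    have hb2 : pvBuild ps.length ps.reverse = some (y, r) := by simpa [pvBN] using hbn
    simp [postfix_to_verilog, postfix_to_verilog_alt, hs, hb2]
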